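-- pv_equiv track=rewrite | github.com/muskankapoor/fall2017projects | ladybugs/ladybugs.py | are_happy
-- ===== SOURCE A (Python) =====
-- def are_happy(s):
--     '''
--     This might miss some of the real edge cases in the hackerrank
--     problem. I haven't read the problem carefully in over a year and
--     forget what it specified for things like lists of only spaces,
--     lists with only one bug etc.
--
--     Also, the Hackerrank question uses an underscore (_) instead of a space.
--     '''
--     # handle a string of less than 2 ladybugs
--     if len(s)<2:
--         return False
--
--     # handle the string of 2 ladybugs - both must be the same and not a space
--     if len(s)==2:
--         return s[1]==s[0] and s[1] != ' '
--
--
--     # handle the case of no spaces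
--     if s.count(' ') == 0:
--         # no spaces, every item must be next to one of the same color
--         # so we loop from 1 to len-1 and for each item
--         # check the one before and the one after
--         # if we ever have an unhappy bug, we can just return False
--         for i in range(1,len(s)-1):
--             if s[i] != s[i+1] and s[i] != s[i-1]:
--                 return False
--
--         # if we ever get here every bug has at least one neighbor of the same color
--         return True
--
--     # if we get here it means there's at least one space so we can rearrange the bugs
--     # however we please so as long as there are at least 2 bugs of each color
--     # we can make them all happy
--
--     # replace the spaces with "" since we don't want to count them
--     # Since we know they were in the string we can rearrange but
--     # they're no longer needed
--     s = s.replace(" ","")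
--
--     # tally up all the bugs to see if there are at least 2 of each
--     bugcounts = {}
--     for bug in s:
--         bugcounts.setdefault(bug,0) # set to 0 the first time we see this key
--         bugcounts[bug]=bugcounts[bug]+1
--
--
--     counts = list(bugcounts.values())
--
--     # if there is any value of 1 in the counts then there's a lone ladybug
--     # that can't be made happy
--     # so we return True (happy) if there are 0 counts of 1 in our list
--     return counts.count(1) == 0
-- ===== SOURCE B (Python) =====
-- def are_happy(s):
--     n = len(s)
--     if n < 2:
--         return False
--     if n == 2:
--         return s[0] == s[1] != ' '
--     if s.count(' ') == 0:
--         # run-length decomposition: happy iff every interior run has length >= 2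
--         # (the first and last runs are exempt, matching the original endpoint rule)
--         runs = _runs(s)
--         return all(r >= 2 for r in runs[1:-1])
--     # at least one space: rearrangeable, so just need no colour with exactly one bug
--     t = s.replace(' ', '')
--     return all(t.count(c) != 1 for c in set(t))
--
--
-- def _runs(s):
--     '''Lengths of maximal blocks of consecutive equal characters.'''
--     runs = []
--     n = len(s)
--     i = 0
--     while i < n:
--         j = i + 1
--         while j < n and s[j] == s[i]:
--             j += 1
--         runs.append(j - i)
--         i = j
--     return runs
-- ===== Notes on version B (the rewrite author's own statement) =====
-- stated objective: alternative
-- what changed: The no-space neighbour-scanning index loop is replaced by a run-length decomposition (all interior runs must have length >= 2, first/last run exempt as in A), and the hand-built tally dict is replaced by a per-distinct-character count check over set(t).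
import Mathlib
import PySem

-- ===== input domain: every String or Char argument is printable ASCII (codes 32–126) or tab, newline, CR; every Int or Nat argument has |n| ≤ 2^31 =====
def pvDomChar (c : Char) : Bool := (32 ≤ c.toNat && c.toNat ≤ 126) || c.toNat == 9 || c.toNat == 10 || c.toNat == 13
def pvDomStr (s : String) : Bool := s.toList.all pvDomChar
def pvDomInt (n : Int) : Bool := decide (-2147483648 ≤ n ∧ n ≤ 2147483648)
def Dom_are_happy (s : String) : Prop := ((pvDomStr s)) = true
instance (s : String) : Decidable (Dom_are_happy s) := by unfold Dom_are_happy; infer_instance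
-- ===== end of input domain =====

-- B replaces A's index-based neighbour scan by a run-length decomposition and A's
-- hand-built tally dict by a per-distinct-character count check (alternative, same cost).

-- ===== PORT A =====
def are_happy (s : String) : Bool :=
  let l := s.toList
  if l.length < 2 then false
  else if l.length = 2 then
    decide (PySem.List.pyGet? l 1 = PySem.List.pyGet? l 0) &&
      decide (PySem.List.pyGet? l 1 ≠ some ' ')
  else if PySem.Str.count s " " = 0 then
    -- for i in range(1, len(s)-1): if unhappy: return False; else True
    (PySem.List.pyRange 1 ((l.length : Int) - 1) 1).all (fun i =>
      !(decide (PySem.List.pyGet? l i ≠ PySem.List.pyGet? l (i + 1)) &&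
        decide (PySem.List.pyGet? l i ≠ PySem.List.pyGet? l (i - 1))))
  else
    let t := PySem.Str.replace s " " ""
    let d := t.toList.foldl (fun d bug =>
      let d1 := d.setdefault bug 0
      d1.insert bug (d1.getD bug 0 + 1)) PySem.Dict.empty
    let counts : List Int := d.values
    decide (counts.count (1 : Int) = 0)

-- ===== PORT B =====
-- _runs: lengths of maximal blocks of consecutive equal characters.
-- Outer while loop over the remaining suffix (i ↦ the suffix l.drop i), accumulating runs;
-- the inner while loop "j = i+1; while j < n and s[j] == s[i]" counts, after the current
-- char, the leading chars equal to it, so j - i = 1 + that count.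
def pvRunsGo (l : List Char) (runs : List Nat) : List Nat :=
  match l with
  | [] => runs
  | c :: rest =>
    let ji := 1 + (rest.takeWhile (fun x => x == c)).length
    pvRunsGo ((c :: rest).drop ji) (runs ++ [ji])
termination_by l.length
decreasing_by simp [List.length_drop]

def pvRuns (l : List Char) : List Nat := pvRunsGo l []

def are_happy_alt (s : String) : Bool :=
  let l := s.toList
  if l.length < 2 then false
  else if l.length = 2 then
    decide (PySem.List.pyGet? l 0 = PySem.List.pyGet? l 1) &&
      decide (PySem.List.pyGet? l 1 ≠ some ' ')
  else if PySem.Str.count s " " = 0 then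
    (PySem.List.slice (pvRuns l) (some 1) (some (-1))).all (fun r => decide (2 ≤ r))
  else
    let t := (PySem.Str.replace s " " "").toList
    (PySem.Set.ofList t).all (fun c => decide (t.count c ≠ 1))

-- ===== PRECONDITION & SPEC =====
def Spec_are_happy (s : String) (out : Bool) : Prop := out = are_happy_alt s
instance (s : String) (out : Bool) : Decidable (Spec_are_happy s out) := by unfold Spec_are_happy; infer_instance

-- ===== CLAIM (what is proved, stated in full; the proofs are below) =====
def Claim_equal_are_happy : Prop := ∀ (s : String), Dom_are_happy s → Spec_are_happy s (are_happy s)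


-- ===== LEMMAS AND PROOFS =====

-- proof-side recursive form of B's run-length decomposition (result built by cons)
def pvRunsSpec (l : List Char) : List Nat :=
  match l with
  | [] => []
  | c :: rest =>
    let i := 1 + (rest.takeWhile (fun x => x == c)).length
    i :: pvRunsSpec ((c :: rest).drop i)
termination_by l.length
decreasing_by simp [List.length_drop]

theorem pvRunsGo_eq : ∀ (n : Nat) (l : List Char), l.length ≤ n → ∀ (acc : List Nat),
    pvRunsGo l acc = acc ++ pvRunsSpec l := by
  intro n
  induction n with
  | zero =>
    intro l hl acc
    have : l = [] := List.length_eq_zero_iff.mp (Nat.le_zero.mp hl)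
    subst this
    simp [pvRunsGo, pvRunsSpec]
  | succ m ih =>
    intro l hl acc
    cases l with
    | nil => simp [pvRunsGo, pvRunsSpec]
    | cons c rest =>
      rw [pvRunsGo, pvRunsSpec]
      have hdl : ((c :: rest).drop (1 + (rest.takeWhile (fun x => x == c)).length)).length ≤ m := by
        have htw : (rest.takeWhile (fun x => x == c)).length ≤ rest.length :=
          (List.takeWhile_sublist _).length_le
        simp only [List.length_drop, List.length_cons]
        simp only [List.length_cons] at hl
        omega
      rw [ih _ hdl]
      simp

theorem pvRuns_eq_spec (l : List Char) : pvRuns l = pvRunsSpec l := by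
  rw [pvRuns, pvRunsGo_eq l.length l le_rfl []]
  simp

-- structural form of A's neighbour scan: prev = previous char, list = remaining chars;
-- checks each element that still has a successor against its successor and predecessor
def pvScan3 (prev : Char) : List Char → Bool
  | cur :: next :: rest => ((cur == next) || (cur == prev)) && pvScan3 cur (next :: rest)
  | _ => true

theorem pvScan3_short (prev : Char) (l : List Char) (h : l.length ≤ 1) :
    pvScan3 prev l = true := by
  match l, h with
  | [], _ => rfl
  | [x], _ => rfl

theorem pvScan3_all_eq (l : List Char) (c : Char) (h : ∀ a ∈ l, a = c) :
    ∀ prev, pvScan3 prev l = true := by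
  induction l with
  | nil => intro prev; rfl
  | cons x t ih =>
    intro prev
    cases t with
    | nil => rfl
    | cons y t' =>
      have hx : x = c := h x (by simp)
      have hy : y = c := h y (by simp)
      have hrec : pvScan3 x (y :: t') = true := ih (fun a ha => h a (by simp [ha])) x
      have hstep : pvScan3 prev (x :: y :: t') = ((x == y || x == prev) && pvScan3 x (y :: t')) := rfl
      rw [hstep, hrec, hx, hy]
      simp

theorem pvScan3_replicate_append (j : Nat) (x : Char) (u : List Char) :
    pvScan3 x (List.replicate j x ++ u) = pvScan3 x u := by
  induction j with
  | zero => rfl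
  | succ m ih =>
    have hstep : List.replicate (m + 1) x ++ u = x :: (List.replicate m x ++ u) := by
      simp [List.replicate_succ]
    rw [hstep]
    cases hrep : List.replicate m x ++ u with
    | nil =>
      have hu : u = [] := (List.append_eq_nil_iff.mp hrep).2
      simp [hu, pvScan3]
    | cons h t =>
      show ((x == h || x == x) && pvScan3 x (h :: t)) = pvScan3 x u
      simp only [beq_self_eq_true, Bool.or_true, Bool.true_and]
      rw [← hrep]
      exact ih

theorem pvDropWhile_head (l : List Char) (c : Char) :
    ∀ d u', l.dropWhile (fun x => x == c) = d :: u' → (d == c) = false := by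
  induction l with
  | nil => intro d u' h; simp [List.dropWhile] at h
  | cons a t ih =>
    intro d u' h
    simp only [List.dropWhile_cons] at h
    split at h
    · exact ih d u' h
    · cases h
      exact Bool.eq_false_iff.mpr ‹¬ _›

theorem pvDropWhile_eq_drop (p : Char → Bool) (l : List Char) :
    l.drop ((l.takeWhile p).length) = l.dropWhile p := by
  induction l with
  | nil => rfl
  | cons a t ih =>
    by_cases hpa : p a = true
    · rw [List.takeWhile_cons_of_pos hpa, List.dropWhile_cons_of_pos hpa]
      simpa using ih
    · rw [List.takeWhile_cons_of_neg (by simpa using hpa),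
        List.dropWhile_cons_of_neg (by simpa using hpa)]
      rfl

theorem pvTakeWhile_replicate (l : List Char) (c : Char) :
    l.takeWhile (fun x => x == c) =
      List.replicate (l.takeWhile (fun x => x == c)).length c := by
  have h : ∀ b ∈ l.takeWhile (fun x => x == c), b = c := by
    intro b hb
    have := List.mem_takeWhile_imp hb
    simpa using this
  exact List.eq_replicate_of_mem h

theorem pvRunsSpec_cons (c : Char) (rest : List Char) :
    pvRunsSpec (c :: rest) =
      (1 + (rest.takeWhile (fun x => x == c)).length) ::
        pvRunsSpec (rest.dropWhile (fun x => x == c)) := by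
  rw [pvRunsSpec]
  have hdrop : (c :: rest).drop (1 + (rest.takeWhile (fun x => x == c)).length) =
      rest.dropWhile (fun x => x == c) := by
    rw [Nat.add_comm, List.drop_succ_cons, pvDropWhile_eq_drop]
  rw [hdrop]

theorem pvRunsSpec_ne_nil (l : List Char) (h : l ≠ []) : pvRunsSpec l ≠ [] := by
  cases l with
  | nil => exact absurd rfl h
  | cons c rest => rw [pvRunsSpec_cons]; simp

-- main run lemma: when prev differs from the head, the scan succeeds iff every run
-- except the last has length >= 2
theorem pvScanRuns_main : ∀ (n : Nat) (t : List Char) (prev : Char), t.length ≤ n →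
    (∀ d, t.head? = some d → d ≠ prev) →
    pvScan3 prev t = ((pvRunsSpec t).dropLast.all (fun r => decide (2 ≤ r))) := by
  intro n
  induction n with
  | zero =>
    intro t prev hlen _
    have ht : t = [] := List.length_eq_zero_iff.mp (Nat.le_zero.mp hlen)
    subst ht; simp [pvScan3, pvRunsSpec]
  | succ m ih =>
    intro t prev hlen hhead
    cases t with
    | nil => simp [pvScan3, pvRunsSpec]
    | cons x xs =>
      have hx : x ≠ prev := hhead x rfl
      obtain ⟨k, hk⟩ : ∃ k, (xs.takeWhile (fun y => y == x)).length = k := ⟨_, rfl⟩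
      obtain ⟨u, hu⟩ : ∃ u, xs.dropWhile (fun y => y == x) = u := ⟨_, rfl⟩
      have hrepl : xs.takeWhile (fun y => y == x) = List.replicate k x := by
        rw [← hk]; exact pvTakeWhile_replicate xs x
      have hxs : xs = List.replicate k x ++ u := by
        conv_lhs => rw [← List.takeWhile_append_dropWhile (p := fun y => y == x) (l := xs)]
        rw [hrepl, hu]
      have hruns : pvRunsSpec (x :: xs) = (1 + k) :: pvRunsSpec u := by
        rw [pvRunsSpec_cons, hk, hu]
      cases u with
      | nil =>
        rw [hruns, show pvRunsSpec ([] : List Char) = [] from by rw [pvRunsSpec]]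
        simp only [List.dropLast_singleton, List.all_nil]
        refine pvScan3_all_eq (x :: xs) x ?_ prev
        intro a ha
        rcases List.mem_cons.mp ha with h | h
        · exact h
        · rw [hxs, List.append_nil] at h
          exact List.eq_of_mem_replicate h
      | cons d u' =>
        have hd : (d == x) = false := pvDropWhile_head xs x d u' hu
        have hdne : d ≠ x := by simpa using hd
        have hulen : (d :: u').length ≤ m := by
          have h1 : (d :: u').length ≤ xs.length := by
            rw [← hu]; exact (List.dropWhile_sublist _).length_le
          have h2 : xs.length ≤ m := by simpa using hlen
          omega
        have hIH : pvScan3 x (d :: u') =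
            ((pvRunsSpec (d :: u')).dropLast.all (fun r => decide (2 ≤ r))) := by
          apply ih (d :: u') x hulen
          intro e he
          cases he
          exact hdne
        have hUne : pvRunsSpec (d :: u') ≠ [] := pvRunsSpec_ne_nil _ (by simp)
        have hdropLast : ((1 + k) :: pvRunsSpec (d :: u')).dropLast =
            (1 + k) :: (pvRunsSpec (d :: u')).dropLast := by
          cases hru : pvRunsSpec (d :: u') with
          | nil => exact absurd hru hUne
          | cons a b => simp
        rw [hruns, hdropLast]
        cases k with
        | zero =>
          have hxs0 : xs = d :: u' := by rw [hxs]; simp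
          subst hxs0
          show ((x == d || x == prev) && pvScan3 x (d :: u')) = _
          have h1 : (x == d) = false := by simp [Ne.symm hdne]
          have h2 : (x == prev) = false := by simp [hx]
          simp [h1, h2]
        | succ m' =>
          have hsplit : x :: xs = x :: x :: (List.replicate m' x ++ (d :: u')) := by
            rw [hxs, List.replicate_succ]; simp
          rw [hsplit]
          show ((x == x || x == prev) && pvScan3 x (x :: (List.replicate m' x ++ (d :: u')))) = _
          have hred : pvScan3 x (x :: (List.replicate m' x ++ (d :: u'))) =
              pvScan3 x (d :: u') := by
            rw [show x :: (List.replicate m' x ++ (d :: u')) =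
                List.replicate (m' + 1) x ++ (d :: u') by simp [List.replicate_succ]]
            exact pvScan3_replicate_append (m' + 1) x (d :: u')
          rw [hred, hIH]
          simp only [beq_self_eq_true, Bool.true_or, Bool.true_and, List.all_cons]
          rw [decide_eq_true (show 2 ≤ 1 + (m' + 1) by omega), Bool.true_and]

theorem pvRangeScan (l : List Char) : ∀ (m j : Nat), 1 ≤ j → l.length - j ≤ m →
    ((PySem.List.pyRange (j : Int) ((l.length : Int) - 1) 1).all (fun i =>
      !(decide (PySem.List.pyGet? l i ≠ PySem.List.pyGet? l (i + 1)) &&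
        decide (PySem.List.pyGet? l i ≠ PySem.List.pyGet? l (i - 1))))) =
    pvScan3 (l.getD (j - 1) ' ') (l.drop j) := by
  intro m
  induction m with
  | zero =>
    intro j hj hlen
    rw [PySem.List.pyRange_one_eq_nil (by omega)]
    simp only [List.all_nil]
    exact (pvScan3_short _ _ (by simp; omega)).symm
  | succ m ihm =>
    intro j hj hlen
    by_cases hcase : (j : Int) < (l.length : Int) - 1
    · have hj2 : j + 1 < l.length := by omega
      have hj1 : j < l.length := by omega
      have hj0 : j - 1 < l.length := by omega
      rw [PySem.List.pyRange_one_cons hcase, List.all_cons]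
      have hrest : ((j : Int) + 1) = ((j + 1 : Nat) : Int) := by push_cast; ring
      rw [hrest, ihm (j + 1) (by omega) (by omega)]
      have hm1 : ((j : Int) - 1) = ((j - 1 : Nat) : Int) := by omega
      have g0 : PySem.List.pyGet? l (j : Int) = some l[j] := by
        rw [PySem.List.pyGet?_natCast]
        exact List.getElem?_eq_getElem hj1
      have g1 : PySem.List.pyGet? l ((j + 1 : Nat) : Int) = some l[j + 1] := by
        rw [PySem.List.pyGet?_natCast]
        exact List.getElem?_eq_getElem hj2
      have g2 : PySem.List.pyGet? l ((j : Int) - 1) = some l[j - 1] := by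
        rw [hm1, PySem.List.pyGet?_natCast]
        exact List.getElem?_eq_getElem hj0
      have hdropj : l.drop j = l[j] :: l.drop (j + 1) := List.drop_eq_getElem_cons hj1
      have hdropj1 : l.drop (j + 1) = l[j + 1] :: l.drop (j + 2) := List.drop_eq_getElem_cons hj2
      conv_rhs => rw [hdropj, hdropj1]
      have hunf : pvScan3 (l.getD (j - 1) ' ') (l[j] :: l[j + 1] :: l.drop (j + 2)) =
          ((l[j] == l[j + 1] || l[j] == l.getD (j - 1) ' ') &&
            pvScan3 l[j] (l[j + 1] :: l.drop (j + 2))) := rfl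
      rw [hunf, ← hdropj1]
      have hgd1 : l.getD (j + 1 - 1) ' ' = l[j] := by
        have : j + 1 - 1 = j := by omega
        rw [this, List.getD_eq_getElem _ _ hj1]
      have hgd0 : l.getD (j - 1) ' ' = l[j - 1] := List.getD_eq_getElem _ _ hj0
      rw [hgd1, hgd0, g0, g1, g2]
      by_cases e1 : l[j] = l[j + 1] <;> by_cases e2 : l[j] = l[j - 1] <;>
        simp [e1, e2]
    · rw [PySem.List.pyRange_one_eq_nil (by omega)]
      simp only [List.all_nil]
      exact (pvScan3_short _ _ (by simp; omega)).symm

-- A's scan from the second char equals B's interior-runs test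
theorem pvNoSpace (c : Char) (rest : List Char) :
    pvScan3 c rest =
      ((pvRunsSpec (c :: rest)).drop 1).dropLast.all (fun r => decide (2 ≤ r)) := by
  obtain ⟨k, hk⟩ : ∃ k, (rest.takeWhile (fun y => y == c)).length = k := ⟨_, rfl⟩
  obtain ⟨u, hu⟩ : ∃ u, rest.dropWhile (fun y => y == c) = u := ⟨_, rfl⟩
  have hrepl : rest.takeWhile (fun y => y == c) = List.replicate k c := by
    rw [← hk]; exact pvTakeWhile_replicate rest c
  have hxs : rest = List.replicate k c ++ u := by
    conv_lhs => rw [← List.takeWhile_append_dropWhile (p := fun y => y == c) (l := rest)]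
    rw [hrepl, hu]
  have hruns : pvRunsSpec (c :: rest) = (1 + k) :: pvRunsSpec u := by
    rw [pvRunsSpec_cons, hk, hu]
  rw [hruns, show ((1 + k) :: pvRunsSpec u).drop 1 = pvRunsSpec u by simp]
  conv_lhs => rw [hxs]
  rw [pvScan3_replicate_append]
  refine pvScanRuns_main u.length u c le_rfl ?_
  intro d hd
  cases u with
  | nil => simp at hd
  | cons d0 u' =>
    simp only [List.head?_cons, Option.some.injEq] at hd
    subst hd
    have := pvDropWhile_head rest c d0 u' hu
    simpa using this

theorem pvSlice_one_neg_one (xs : List Nat) :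
    PySem.List.slice xs (some 1) (some (-1)) = (xs.drop 1).dropLast := by
  have h1 : PySem.List.clampIdx xs.length 1 = min 1 xs.length := by
    have h := PySem.List.clampIdx_natCast xs.length 1
    simpa using h
  show (xs.drop (PySem.List.clampIdx xs.length 1)).take
      (PySem.List.clampIdx xs.length (-1) - PySem.List.clampIdx xs.length 1) = _
  rw [PySem.List.clampIdx_neg_one, h1]
  cases xs with
  | nil => simp
  | cons x t =>
    have hmin : min 1 (x :: t).length = 1 := by simp
    rw [hmin]
    show t.take ((x :: t).length - 1 - 1) = t.dropLast
    have hlen : (x :: t).length - 1 - 1 = t.length - 1 := by simp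
    rw [hlen, List.dropLast_eq_take]

theorem pvCountBranch (t : List Char) :
    decide (((t.foldl (fun d bug =>
        let d1 := d.setdefault bug 0
        d1.insert bug (d1.getD bug 0 + 1)) PySem.Dict.empty).values).count (1 : Int) = 0) =
    ((PySem.Set.ofList t).all (fun c => decide (t.count c ≠ 1))) := by
  have hstep : ∀ (d : PySem.Dict Char Int) (bug : Char),
      (let d1 := d.setdefault bug 0
       d1.insert bug (d1.getD bug 0 + 1)) = d.insert bug (d.getD bug 0 + 1) := by
    intro d bug
    show (d.setdefault bug 0).insert bug ((d.setdefault bug 0).getD bug 0 + 1) = _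
    by_cases hc : d.contains bug = true
    · rw [PySem.Dict.setdefault_of_contains d 0 hc]
    · have hc' : d.contains bug = false := by simpa using hc
      rw [PySem.Dict.setdefault_of_not_contains d 0 hc', PySem.Dict.getD_insert_self,
        PySem.Dict.insert_insert_self, PySem.Dict.getD_of_not_contains d 0 hc']
  have hfold : t.foldl (fun d bug =>
        let d1 := d.setdefault bug 0
        d1.insert bug (d1.getD bug 0 + 1)) (PySem.Dict.empty : PySem.Dict Char Int) =
      t.foldl (fun d bug => d.insert bug (d.getD bug 0 + 1))
        (PySem.Dict.empty : PySem.Dict Char Int) :=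
    PySem.List.foldl_congr_mem t _ _ _ (fun acc x _ => hstep acc x)
  rw [hfold, PySem.Dict.foldl_insert_getD_add_one_eq_counter,
    PySem.Dict.values_eq_map_keys _ (PySem.Dict.nodup_keys_counter t) 0,
    PySem.Dict.keys_counter]
  rw [Bool.eq_iff_iff]
  simp only [decide_eq_true_eq, List.count_eq_zero, List.mem_map, List.all_eq_true,
    PySem.Dict.getD_counter, not_exists, not_and]
  constructor
  · intro h x hx h1
    exact h x hx (by exact_mod_cast h1)
  · intro h x hx h1
    exact h x hx (by exact_mod_cast h1)

-- ===== VERDICT (by name: the statement is the Claim_ definition above) =====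
theorem are_happy_spec : Claim_equal_are_happy := by
  unfold Claim_equal_are_happy Spec_are_happy
  intro s _
  unfold are_happy are_happy_alt
  dsimp only
  split_ifs with h1 h2 h3
  · rfl
  · -- two ladybugs: the same pair test written the other way round
    obtain ⟨a, b, hab⟩ := List.length_eq_two.mp h2
    rw [hab]
    have ga : PySem.List.pyGet? [a, b] 0 = some a := rfl
    have gb : PySem.List.pyGet? [a, b] 1 = some b := rfl
    rw [ga, gb]
    by_cases hEq : a = b <;> simp [hEq, eq_comm]
  · -- no spaces: neighbour scan = interior-runs test
    cases hl : s.toList with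
    | nil => exfalso; rw [hl] at h1; simp at h1
    | cons c rest =>
      have hA := pvRangeScan (c :: rest) (c :: rest).length 1 le_rfl (by omega)
      have hcast : ((1 : Nat) : Int) = (1 : Int) := by norm_num
      rw [hcast] at hA
      rw [hA]
      have hgd : (c :: rest).getD (1 - 1) ' ' = c := rfl
      have hdr : (c :: rest).drop 1 = rest := rfl
      rw [hgd, hdr, pvNoSpace, pvSlice_one_neg_one, pvRuns_eq_spec]
  · -- at least one space: tally dict = per-distinct-character counts
    exact pvCountBranch (PySem.Str.replace s " " "").toList
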